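-- pv_equiv track=rewrite | github.com/LZhengisme/self-infilling | lm_eval/utils.py | compact_lines
-- ===== SOURCE A (Python) =====
-- def compact_lines(lines):
--     merged_lines = []
--     leading_nonnewlines = -1
--     temp_list = []
--     # find the first line that is not \n
--     for i, sol_line in enumerate(lines):
--         if sol_line == "":
--             temp_list.append(sol_line)
--         else:
--             leading_nonnewlines = i
--             temp_list.append(sol_line)
--             break
--     # if no not-newline is found, return
--     if leading_nonnewlines == -1:
--         return ["\n".join(lines)]
--     lines[leading_nonnewlines] = "\n".join(temp_list)
--     temp = ""
--     for i, sol_line in enumerate(lines[leading_nonnewlines:]):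
--         if sol_line == "":
--             temp = temp + "\n"
--         else:
--             if temp:
--                 merged_lines.append(temp)
--             temp = sol_line
--     if temp:
--         # split the last line into line + \n
--         merged_lines.append(temp)
--     return merged_lines
-- ===== SOURCE B (Python) =====
-- # Single backward pass with an integer run counter instead of A's forward scan
-- # that mutates lines[] and accumulates a growing string; return value only
-- # (B does not reproduce A's in-place write to lines[first_content_index]).
-- def compact_lines(lines):
--     out = []
--     run = 0
--     for x in reversed(lines):
--         if x == "":
--             run += 1
--         else:
--             out.append(x + "\n" * run)
--             run = 0
--     if not out:
--         return ["\n".join(lines)]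
--     out.reverse()
--     out[0] = "\n" * run + out[0]
--     return out
-- ===== Notes on version B (the rewrite author's own statement) =====
-- stated objective: alternative
-- what changed: Replaces A's forward scan (which mutates lines[first-content-index] in place and accumulates a growing string temp) with a single backward pass that counts empty-line runs with an integer counter and prefixes the leading-newline run at the end; B does not mutate its argument (return value is identical).
import Mathlib
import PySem

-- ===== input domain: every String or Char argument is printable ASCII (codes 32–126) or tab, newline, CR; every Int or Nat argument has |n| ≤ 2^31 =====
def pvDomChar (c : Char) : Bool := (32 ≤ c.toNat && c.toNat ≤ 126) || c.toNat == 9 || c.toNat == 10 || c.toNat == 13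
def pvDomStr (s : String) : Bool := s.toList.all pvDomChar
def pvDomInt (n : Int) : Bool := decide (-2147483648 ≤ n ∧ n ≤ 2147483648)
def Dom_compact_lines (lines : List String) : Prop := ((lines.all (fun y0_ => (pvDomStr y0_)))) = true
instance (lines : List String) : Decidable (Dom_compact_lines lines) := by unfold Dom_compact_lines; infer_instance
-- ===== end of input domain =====

-- B re-implements A's forward mutate-and-accumulate scan as one backward pass with an
-- integer run counter (alternative decomposition; equivalence is about the RETURN value
-- only: A mutates lines[first-content-index] in place, B does not mutate its argument).

-- ===== PORT A =====
-- first loop of A: enumerate with break, returning (leading_nonnewlines, temp_list)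
def compactA_find : List String → Int → Int × List String
  | [], _ => (-1, [])
  | x :: xs, i =>
    if x = "" then
      let r := compactA_find xs (i + 1)
      (r.1, x :: r.2)
    else (i, [x])

-- body of A's second loop (state = (merged_lines, temp))
def compactA_step (st : List String × String) (l : String) : List String × String :=
  if l = "" then (st.1, st.2 ++ "\n")
  else (if st.2 ≠ "" then st.1 ++ [st.2] else st.1, l)

-- A's trailing 'if temp: merged_lines.append(temp)'
def compactA_fin (st : List String × String) : List String :=
  if st.2 ≠ "" then st.1 ++ [st.2] else st.1

def compact_lines (lines : List String) : List String :=
  let r := compactA_find lines 0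
  if r.1 = -1 then [PySem.Str.join "\n" lines]
  else
    let lines' := PySem.List.pySetD lines r.1 (PySem.Str.join "\n" r.2)
    compactA_fin ((PySem.List.slice lines' (some r.1) none).foldl compactA_step ([], ""))

-- ===== PORT B =====
-- hand port of Python's '"\n" * n' (exact for n ≥ 0; B's run counter is never negative)
def nlRep (n : Nat) : String := String.ofList (List.replicate n '\n')

-- body of B's backward loop (state = (out, run); run ported as Nat: it only counts up from 0)
def compactB_step (st : List String × Nat) (x : String) : List String × Nat :=
  if x = "" then (st.1, st.2 + 1) else (st.1 ++ [x ++ nlRep st.2], 0)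

def compact_lines_alt (lines : List String) : List String :=
  let st := lines.reverse.foldl compactB_step ([], 0)
  if st.1 = [] then [PySem.Str.join "\n" lines]
  else
    let out := st.1.reverse
    PySem.List.pySetD out 0 (nlRep st.2 ++ PySem.List.pyGetD out 0 "")

-- ===== PRECONDITION & SPEC =====
def Spec_compact_lines (lines : List String) (out : List String) : Prop := out = compact_lines_alt lines
instance (lines : List String) (out : List String) : Decidable (Spec_compact_lines lines out) := by unfold Spec_compact_lines; infer_instance

-- ===== CLAIM (what is proved, stated in full; the proofs are below) =====
def Claim_equal_compact_lines : Prop := ∀ (lines : List String), Dom_compact_lines lines → Spec_compact_lines lines (compact_lines lines)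

-- ===== LEMMAS AND PROOFS =====

-- common recursive description of the merged output (current accumulated chunk + remaining lines)
def pvGo (cur : String) : List String → List String
  | [] => [cur]
  | l :: ls => if l = "" then pvGo (cur ++ "\n") ls else cur :: pvGo l ls

-- string facts
theorem pv_eq_empty_iff (s : String) : s = "" ↔ s.toList = [] := by
  rw [← String.toList_inj]; simp

theorem pv_append_nl_ne (t : String) : t ++ "\n" ≠ "" := by
  rw [Ne, pv_eq_empty_iff]; simp

theorem pv_prepend_ne (p x : String) (hx : x ≠ "") : p ++ x ≠ "" := by
  rw [Ne, pv_eq_empty_iff]; rw [Ne, pv_eq_empty_iff] at hx; simp [hx]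

theorem nlRep_zero : nlRep 0 = "" := rfl

theorem nlRep_succ (n : Nat) : nlRep (n + 1) = "\n" ++ nlRep n := by
  rw [← String.toList_inj]; simp [nlRep, List.replicate_succ]

theorem pv_joinRep (k : Nat) (x : String) :
    PySem.Str.join "\n" (List.replicate k "" ++ [x]) = nlRep k ++ x := by
  induction k with
  | zero => rw [← String.toList_inj]; simp [PySem.Str.toList_join, PySem.Chars.join_singleton, nlRep]
  | succ k ih =>
    rw [← String.toList_inj] at ih ⊢
    simp only [PySem.Str.toList_join] at ih ⊢
    obtain ⟨q, rest, hqr⟩ := List.exists_cons_of_ne_nil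
      (by simp : (List.map String.toList (List.replicate k ("":String) ++ [x])) ≠ [])
    rw [List.replicate_succ, List.cons_append, List.map_cons, hqr,
      PySem.Chars.join_cons_cons, ← hqr, ih]
    simp [nlRep_succ]

-- splitting any input into leading empties + first content line, or all-empty
theorem pv_decomp (ls : List String) :
    (∀ y ∈ ls, y = "") ∨ ∃ k x rest, x ≠ "" ∧ ls = List.replicate k "" ++ x :: rest := by
  induction ls with
  | nil => left; simp
  | cons a ls ih =>
    by_cases ha : a = ""
    · subst ha
      rcases ih with h | ⟨k, x, rest, hx, hrest⟩
      · left; simpa using h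
      · right; exact ⟨k + 1, x, rest, hx, by simp [List.replicate_succ, hrest]⟩
    · right; exact ⟨0, a, ls, ha, by simp⟩

theorem compactB_step_empty (st : List String × Nat) : compactB_step st "" = (st.1, st.2 + 1) := by
  simp [compactB_step]

theorem compactB_step_ne (st : List String × Nat) (l : String) (hl : l ≠ "") :
    compactB_step st l = (st.1 ++ [l ++ nlRep st.2], 0) := by
  simp [compactB_step, hl]

-- ===== A-side characterisation =====
theorem compactA_find_allEmpty (ls : List String) (i : Int) (h : ∀ y ∈ ls, y = "") :
    compactA_find ls i = (-1, ls) := by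
  induction ls generalizing i with
  | nil => rfl
  | cons a ls ih =>
    have ha : a = "" := h a (by simp)
    simp [compactA_find, ha, ih (i + 1) (fun y hy => h y (by simp [hy]))]

theorem compactA_find_decomp (k : Nat) (x : String) (rest : List String) (i : Int) (hx : x ≠ "") :
    compactA_find (List.replicate k "" ++ x :: rest) i = (i + k, List.replicate k "" ++ [x]) := by
  induction k generalizing i with
  | zero => simp [compactA_find, hx]
  | succ k ih =>
    simp only [List.replicate_succ, List.cons_append, compactA_find, reduceIte, ih (i + 1)]
    refine Prod.ext ?_ rfl
    push_cast; ring

theorem compactA_foldGo (ls : List String) (m : List String) (t : String) (ht : t ≠ "") :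
    compactA_fin (ls.foldl compactA_step (m, t)) = m ++ pvGo t ls := by
  induction ls generalizing m t with
  | nil => simp [compactA_fin, ht, pvGo]
  | cons l ls ih =>
    by_cases hl : l = ""
    · simp only [List.foldl_cons, compactA_step, hl, reduceIte]
      rw [ih m (t ++ "\n") (pv_append_nl_ne t)]
      simp [pvGo]
    · simp only [List.foldl_cons, compactA_step, if_neg hl, if_pos ht]
      rw [ih (m ++ [t]) l hl]
      simp [pvGo, hl]

theorem compactA_char (k : Nat) (x : String) (rest : List String) (hx : x ≠ "") :
    compact_lines (List.replicate k "" ++ x :: rest) = pvGo (nlRep k ++ x) rest := by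
  unfold compact_lines
  rw [compactA_find_decomp k x rest 0 hx]
  rw [if_neg (by omega : ¬ ((0 : Int) + (k : Int) = -1))]
  simp only [zero_add]
  rw [pv_joinRep k x]
  have hset : PySem.List.pySetD (List.replicate k "" ++ x :: rest) (k : Int) (nlRep k ++ x)
      = List.replicate k "" ++ (nlRep k ++ x) :: rest := by
    rw [PySem.List.pySetD_natCast, List.set_append]; simp
  rw [hset, PySem.List.slice_from_natCast]
  have hdrop : (List.replicate k ("":String) ++ (nlRep k ++ x) :: rest).drop k
      = (nlRep k ++ x) :: rest := by
    simp
  rw [hdrop]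
  have hne : nlRep k ++ x ≠ "" := pv_prepend_ne _ _ hx
  simp only [List.foldl_cons, compactA_step, if_neg hne]
  simp only [ne_eq, not_true_eq_false, if_false]
  rw [compactA_foldGo rest [] (nlRep k ++ x) hne]
  simp

-- ===== B-side characterisation =====
theorem compactB_foldr (ls : List String) :
    ls.reverse.foldl compactB_step ([], 0) = ls.foldr (fun x st => compactB_step st x) ([], 0) := by
  rw [List.foldl_reverse]

theorem compactB_allEmpty (ls : List String) (h : ∀ y ∈ ls, y = "") :
    ls.foldr (fun x st => compactB_step st x) ([], 0) = ([], ls.length) := by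
  induction ls with
  | nil => rfl
  | cons a ls ih =>
    have ha : a = "" := h a (by simp)
    simp only [List.foldr_cons, ha, compactB_step_empty, ih (fun y hy => h y (by simp [hy]))]
    simp

theorem compactB_go (rs : List String) (x : String) (hx : x ≠ "") :
    (x ++ nlRep (rs.foldr (fun x st => compactB_step st x) ([], 0)).2)
      :: (rs.foldr (fun x st => compactB_step st x) ([], 0)).1.reverse = pvGo x rs := by
  induction rs generalizing x with
  | nil => simp [pvGo, nlRep_zero]
  | cons l rs ih =>
    by_cases hl : l = ""
    · simp only [List.foldr_cons, hl, compactB_step_empty]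
      rw [nlRep_succ, ← String.append_assoc, ih (x ++ "\n") (pv_append_nl_ne x)]
      simp [pvGo]
    · simp only [List.foldr_cons, compactB_step_ne _ _ hl]
      simp only [List.reverse_append, List.reverse_cons, List.reverse_nil, List.nil_append,
        List.singleton_append, nlRep_zero, String.append_empty]
      rw [ih l hl]
      simp [pvGo, hl]

theorem compactB_repl (k : Nat) (t : List String) :
    (List.replicate k "" ++ t).foldr (fun x st => compactB_step st x) ([], 0)
      = ((t.foldr (fun x st => compactB_step st x) ([], 0)).1,
         (t.foldr (fun x st => compactB_step st x) ([], 0)).2 + k) := by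
  induction k with
  | zero => simp
  | succ k ih =>
    simp only [List.replicate_succ, List.cons_append, List.foldr_cons, ih, compactB_step_empty]
    refine Prod.ext rfl ?_
    simp
    ring

-- head-prefix lemma: pvGo pushes a prefix of the accumulator onto the first output element
theorem pvGo_prepend (rest : List String) (cur p : String) :
    pvGo (p ++ cur) rest = (p ++ (pvGo cur rest).headD "") :: (pvGo cur rest).tail := by
  induction rest generalizing cur with
  | nil => simp [pvGo]
  | cons l rs ih =>
    by_cases hl : l = ""
    · simp only [pvGo, hl, reduceIte, String.append_assoc]
      exact ih (cur ++ "\n")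
    · simp [pvGo, hl]

theorem compactB_char (k : Nat) (x : String) (rest : List String) (hx : x ≠ "") :
    compact_lines_alt (List.replicate k "" ++ x :: rest) = pvGo (nlRep k ++ x) rest := by
  unfold compact_lines_alt
  rw [compactB_foldr, compactB_repl k (x :: rest)]
  set F := rest.foldr (fun x st => compactB_step st x) ([], 0) with hF
  simp only [List.foldr_cons, ← hF, compactB_step_ne _ x hx]
  have hne : F.1 ++ [x ++ nlRep F.2] ≠ [] := by simp
  simp only [zero_add]
  rw [if_neg hne]
  simp only [List.reverse_append, List.reverse_cons, List.reverse_nil, List.nil_append,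
    List.singleton_append]
  rw [PySem.List.pyGetD_zero_cons]
  have hset : PySem.List.pySetD ((x ++ nlRep F.2) :: F.1.reverse) (0 : Int)
      (nlRep k ++ (x ++ nlRep F.2)) = (nlRep k ++ (x ++ nlRep F.2)) :: F.1.reverse := by
    have := PySem.List.pySetD_natCast (xs := (x ++ nlRep F.2) :: F.1.reverse) (n := 0)
      (v := nlRep k ++ (x ++ nlRep F.2))
    simpa using this
  rw [hset, pvGo_prepend rest x (nlRep k), ← compactB_go rest x hx]
  rfl

-- ===== all-empty case =====
theorem pv_allEmpty_eq (ls : List String) (h : ∀ y ∈ ls, y = "") :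
    compact_lines ls = compact_lines_alt ls := by
  unfold compact_lines compact_lines_alt
  rw [compactA_find_allEmpty ls 0 h, compactB_foldr, compactB_allEmpty ls h]
  simp

-- ===== VERDICT (by name: the statement is the Claim_ definition above) =====
theorem compact_lines_spec : Claim_equal_compact_lines := by
  intro lines _
  unfold Spec_compact_lines
  rcases pv_decomp lines with h | ⟨k, x, rest, hx, hrest⟩
  · exact pv_allEmpty_eq lines h
  · subst hrest
    rw [compactA_char k x rest hx, compactB_char k x rest hx]
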